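-- pv_equiv track=rewrite | github.com/kopeadri/BPMN-Models | getting_relations.py | get_events_counter
-- ===== SOURCE A (Python) =====
-- def get_events_counter(direct_successors_dict,log_matrix):
--   events = list(direct_successors_dict.keys())
--   events_counter = {}
--   for e in events:
--     counter = 0
--     for log_array in log_matrix:
--       counter += log_array.count(e)
--     events_counter[e] = counter
--   return events_counter
-- ===== SOURCE B (Python) =====
-- def get_events_counter(direct_successors_dict, log_matrix):
--     # One pass over all log entries builds a total counter, then each event
--     # is answered by a dict lookup instead of rescanning the whole matrix.
--     total = {}
--     for log_array in log_matrix: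
--         for x in log_array:
--             total[x] = total.get(x, 0) + 1
--     return {e: total.get(e, 0) for e in direct_successors_dict}
-- ===== Notes on version B (the rewrite author's own statement) =====
-- stated objective: faster
-- what changed: Instead of rescanning the whole log matrix once per event (E passes with list.count), B counts every log entry in a single pass into a dict and answers each event by one lookup.
import Mathlib
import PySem

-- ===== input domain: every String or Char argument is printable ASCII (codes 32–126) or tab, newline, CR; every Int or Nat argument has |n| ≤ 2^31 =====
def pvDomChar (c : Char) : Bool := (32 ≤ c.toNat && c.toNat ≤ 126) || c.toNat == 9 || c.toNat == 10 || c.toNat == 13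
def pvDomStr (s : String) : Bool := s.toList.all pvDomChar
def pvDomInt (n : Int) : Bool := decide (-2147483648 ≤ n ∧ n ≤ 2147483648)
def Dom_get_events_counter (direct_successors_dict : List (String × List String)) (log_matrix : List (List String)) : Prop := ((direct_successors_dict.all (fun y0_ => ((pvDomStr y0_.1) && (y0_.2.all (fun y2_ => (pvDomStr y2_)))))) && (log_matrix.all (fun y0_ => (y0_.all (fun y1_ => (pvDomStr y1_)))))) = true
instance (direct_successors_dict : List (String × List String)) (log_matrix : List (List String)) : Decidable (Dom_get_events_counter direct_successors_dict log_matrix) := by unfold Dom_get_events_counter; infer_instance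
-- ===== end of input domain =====

-- B replaces A's per-event rescan of the whole log matrix by one counting pass
-- over the matrix plus a lookup per event (objective: faster, measured by the check).


-- ===== PORT A =====
-- events = list(dict.keys); for each event scan every log row with list.count
def get_events_counter (direct_successors_dict : List (String × List String)) (log_matrix : List (List String)) : List (String × Int) :=
  let events := direct_successors_dict.map Prod.fst
  let events_counter : PySem.Dict String Int :=
    events.foldl (fun ec e =>
      let counter : Int :=
        log_matrix.foldl (fun c log_array => c + (PySem.List.count log_array e : Int)) 0
      ec.insert e counter) PySem.Dict.empty
  events_counter.items

-- ===== PORT B =====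
-- one counting pass over all log entries, then one lookup per event
def get_events_counter_alt (direct_successors_dict : List (String × List String)) (log_matrix : List (List String)) : List (String × Int) :=
  let total : PySem.Dict String Int :=
    log_matrix.foldl (fun d log_array =>
      log_array.foldl (fun d x => d.insert x (d.getD x 0 + 1)) d) PySem.Dict.empty
  let out : PySem.Dict String Int :=
    (direct_successors_dict.map Prod.fst).foldl (fun acc e => acc.insert e (total.getD e 0)) PySem.Dict.empty
  out.items

-- ===== PRECONDITION & SPEC =====
def Spec_get_events_counter (direct_successors_dict : List (String × List String)) (log_matrix : List (List String)) (out : List (String × Int)) : Prop := out = get_events_counter_alt direct_successors_dict log_matrix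
instance (direct_successors_dict : List (String × List String)) (log_matrix : List (List String)) (out : List (String × Int)) : Decidable (Spec_get_events_counter direct_successors_dict log_matrix out) := by unfold Spec_get_events_counter; infer_instance

-- ===== CLAIM (what is proved, stated in full; the proofs are below) =====
def Claim_equal_get_events_counter : Prop := ∀ (direct_successors_dict : List (String × List String)) (log_matrix : List (List String)), Dom_get_events_counter direct_successors_dict log_matrix → Spec_get_events_counter direct_successors_dict log_matrix (get_events_counter direct_successors_dict log_matrix)

-- ===== LEMMAS AND PROOFS =====

-- B's total counter looks up to the number of occurrences across all rows
lemma getD_total (lm : List (List String)) (d : PySem.Dict String Int) (e : String) :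
    (lm.foldl (fun d log_array => log_array.foldl (fun d x => d.insert x (d.getD x 0 + 1)) d) d).getD e 0
      = d.getD e 0 + (lm.map (fun row => (List.count e row : Int))).sum := by
  induction lm generalizing d with
  | nil => simp
  | cons row rest ih =>
      simp only [List.foldl_cons, List.map_cons, List.sum_cons, ih,
        PySem.Dict.getD_foldl_insert_add_one]
      ring

-- A's per-event accumulation is the same sum
lemma sumA (lm : List (List String)) (c : Int) (e : String) :
    lm.foldl (fun c log_array => c + (PySem.List.count log_array e : Int)) c
      = c + (lm.map (fun row => (List.count e row : Int))).sum := by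
  induction lm generalizing c with
  | nil => simp
  | cons row rest ih =>
      rw [List.foldl_cons, ih]
      simp only [List.map_cons, List.sum_cons, PySem.List.count_eq]
      ring

-- folding inserts of pointwise-equal values gives equal dicts
lemma foldl_insert_congr (events : List String) (acc : PySem.Dict String Int)
    (f g : String → Int) (h : ∀ e ∈ events, f e = g e) :
    events.foldl (fun a e => a.insert e (f e)) acc
      = events.foldl (fun a e => a.insert e (g e)) acc := by
  induction events generalizing acc with
  | nil => rfl
  | cons e rest ih =>
      simp only [List.foldl_cons, h e (List.mem_cons_self ..)]
      exact ih _ (fun x hx => h x (List.mem_cons_of_mem _ hx))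

-- ===== VERDICT (by name: the statement is the Claim_ definition above) =====
theorem get_events_counter_spec : Claim_equal_get_events_counter := by
  intro dsd lm _
  unfold Spec_get_events_counter get_events_counter get_events_counter_alt
  simp only []
  congr 1
  apply foldl_insert_congr
  intro e _
  rw [sumA, getD_total]
  simp
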